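-- pv_equiv track=rewrite | github.com/ser13ban/preparing_for_interviews | foobar_google_chalange.py | solution
-- ===== SOURCE A (Python) =====
-- def solution(s):
--     if not s:
--         return 0
--
--     nxt = [0]*len(s)
--     for i in range(1, len(nxt)):
--         k = nxt[i - 1]
--         while True:
--             if s[i] == s[k]:
--                 nxt[i] = k + 1
--                 break
--             elif k == 0:
--                 nxt[i] = 0
--                 break
--             else:
--                 k = nxt[k - 1]
--
--     smallPieceLen = len(s) - nxt[-1]
--     return len(s) // smallPieceLen
-- ===== SOURCE B (Python) =====
-- def solution(s):
--     # Smallest period p: least p >= 1 with s[i] == s[i-p] for all i in [p, n).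
--     # The string splits into n // p equal-or-truncated pieces, exactly A's quotient.
--     n = len(s)
--     if n == 0:
--         return 0
--     p = 1
--     while p < n and any(s[i] != s[i - p] for i in range(p, n)):
--         p += 1
--     return n // p
-- ===== Notes on version B (the rewrite author's own statement) =====
-- stated objective: alternative
-- what changed: Replaces the KMP failure-function table (auxiliary nxt array with an inner border-chain while loop) by a direct fail-fast scan for the smallest period p (least p >= 1 with s[i] == s[i-p] for all i >= p), returning the same quotient n // p = n // (n - longest border).
import Mathlib
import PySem

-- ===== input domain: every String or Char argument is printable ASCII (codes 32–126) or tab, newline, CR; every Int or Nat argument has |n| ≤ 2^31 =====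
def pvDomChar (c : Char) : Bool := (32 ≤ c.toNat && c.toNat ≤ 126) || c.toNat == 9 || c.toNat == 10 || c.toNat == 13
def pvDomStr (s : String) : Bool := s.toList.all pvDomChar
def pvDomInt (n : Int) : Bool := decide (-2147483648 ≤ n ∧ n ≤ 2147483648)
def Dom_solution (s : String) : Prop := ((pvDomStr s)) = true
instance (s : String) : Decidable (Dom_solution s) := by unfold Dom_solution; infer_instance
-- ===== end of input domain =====

-- B replaces A's KMP failure-function table by a direct fail-fast scan for the
-- smallest period p (least p with s[i]==s[i-p] for all i>=p); objective: alternative.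

-- ===== PORT A =====
-- inner 'while True' loop of A; fuel is only a totality guard (the chain k strictly decreases)
def kmpLoop (cs : List Char) (nxt : List Int) (i k : Int) (fuel : Nat) : Int :=
  match fuel with
  | 0 => 0
  | f+1 =>
    if PySem.List.pyGet? cs i = PySem.List.pyGet? cs k then k + 1
    else if k = 0 then 0
    else kmpLoop cs nxt i (PySem.List.pyGetD nxt (k-1) 0) f

-- body of A's 'for i in range(1, len(nxt))' loop: nxt[i] = <while-loop result>
def kmpStep (cs : List Char) (nxt : List Int) (i : Int) : List Int :=
  PySem.List.pySetD nxt i (kmpLoop cs nxt i (PySem.List.pyGetD nxt (i-1) 0) cs.length)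

def solution (s : String) : Int :=
  let cs := s.toList
  if cs.isEmpty then 0
  else
    let n := cs.length
    let nxt := (PySem.List.pyRange 1 (n:Int) 1).foldl (kmpStep cs) (List.replicate n (0:Int))
    let smallPieceLen := (n:Int) - PySem.List.pyGetD nxt (-1) 0
    PySem.Int.floordiv (n:Int) smallPieceLen

-- ===== PORT B =====
-- 'while p < n and any(s[i] != s[i - p] for i in range(p, n)): p += 1'
def pLoop (cs : List Char) (p : Nat) : Int :=
  if _h : p < cs.length then
    if (PySem.List.pyRange (p:Int) (cs.length:Int) 1).any
        (fun i => !(PySem.List.pyGet? cs i == PySem.List.pyGet? cs (i - (p:Int)))) then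
      pLoop cs (p+1)
    else (p:Int)
  else (p:Int)
termination_by cs.length - p

def solution_alt (s : String) : Int :=
  let cs := s.toList
  let n := cs.length
  if n = 0 then 0
  else PySem.Int.floordiv (n:Int) (pLoop cs 1)

-- ===== PRECONDITION & SPEC =====
def Spec_solution (s : String) (out : Int) : Prop := out = solution_alt s
instance (s : String) (out : Int) : Decidable (Spec_solution s out) := by unfold Spec_solution; infer_instance

-- ===== CLAIM (what is proved, stated in full; the proofs are below) =====
def Claim_equal_solution : Prop := ∀ (s : String), Dom_solution s → Spec_solution s (solution s)

-- ===== LEMMAS AND PROOFS =====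

-- b is a border of the length-i prefix of l: it is proper and the prefix of length b
-- matches the suffix of that prefix, stated pointwise
abbrev IsB (l : List Char) (i b : Nat) : Prop :=
  b < i ∧ ∀ j < b, l.getD j 'x' = l.getD (i - b + j) 'x'

-- longest border of the length-i prefix
def F (l : List Char) (i : Nat) : Nat := Nat.findGreatest (fun b => IsB l i b) (i-1)

lemma isB_zero (l : List Char) (i : Nat) (h : 0 < i) : IsB l i 0 :=
  ⟨h, by omega⟩

lemma isB_trans {l : List Char} {i b c : Nat} (h1 : IsB l i b) (h2 : IsB l b c) :
    IsB l i c := by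
  obtain ⟨hb, e1⟩ := h1
  obtain ⟨hc, e2⟩ := h2
  refine ⟨by omega, fun j hj => ?_⟩
  have := e1 (b - c + j) (by omega)
  have harith : i - b + (b - c + j) = i - c + j := by omega
  rw [e2 j hj, this, harith]

lemma isB_down {l : List Char} {i b c : Nat} (hb : IsB l i b) (hc : IsB l i c)
    (hlt : c < b) : IsB l b c := by
  obtain ⟨hbi, e1⟩ := hb
  obtain ⟨hci, e2⟩ := hc
  refine ⟨hlt, fun j hj => ?_⟩
  have h1 := e1 (b - c + j) (by omega)
  have harith : i - b + (b - c + j) = i - c + j := by omega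
  rw [e2 j hj, ← harith, ← h1]

lemma isB_ext {l : List Char} {i b : Nat} :
    IsB l (i+1) (b+1) ↔ IsB l i b ∧ l.getD b 'x' = l.getD i 'x' := by
  constructor
  · rintro ⟨hlt, e⟩
    refine ⟨⟨by omega, fun j hj => ?_⟩, ?_⟩
    · have := e j (by omega)
      have harith : i + 1 - (b + 1) + j = i - b + j := by omega
      rwa [harith] at this
    · have := e b (by omega)
      have harith : i + 1 - (b + 1) + b = i := by omega
      rwa [harith] at this
  · rintro ⟨⟨hlt, e⟩, hb⟩
    refine ⟨by omega, fun j hj => ?_⟩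
    have harith : i + 1 - (b + 1) + j = i - b + j := by omega
    rw [harith]
    rcases Nat.lt_or_ge j b with h | h
    · exact e j h
    · have hjb : j = b := by omega
      rw [hjb]
      have harith2 : i - b + b = i := by omega
      rw [harith2]; exact hb

lemma F_lt (l : List Char) {i : Nat} (h : 1 ≤ i) : F l i < i :=
  lt_of_le_of_lt (Nat.findGreatest_le _) (by omega)

lemma F_isB (l : List Char) {i : Nat} (h : 1 ≤ i) : IsB l i (F l i) := by
  rcases Nat.eq_zero_or_pos (F l i) with h0 | hpos
  · rw [h0]; exact isB_zero l i h
  · exact Nat.findGreatest_spec (P := fun b => IsB l i b) (m := 0)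
      (Nat.zero_le _) (isB_zero l i h)

lemma F_max {l : List Char} {i b : Nat} (h : IsB l i b) : b ≤ F l i :=
  Nat.le_findGreatest (by omega) h

lemma kmpLoop_eq (l : List Char) (nxt : List Int) (i : Nat) (hi : i < l.length)
    (hnxt : ∀ j : Nat, j < i → PySem.List.pyGetD nxt (j:Int) 0 = (F l (j+1) : Int)) :
    ∀ fuel k : Nat, IsB l i k → (∀ c, IsB l (i+1) (c+1) → c ≤ k) → k < fuel →
    kmpLoop l nxt (i:Int) (k:Int) fuel = (F l (i+1) : Int) := by
  intro fuel
  induction fuel with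
  | zero => intro k _ _ hf; omega
  | succ f IH =>
    intro k hk hmax hf
    have hki : k < i := hk.1
    have hkl : k < l.length := by omega
    have hcond : (PySem.List.pyGet? l (i:Int) = PySem.List.pyGet? l (k:Int)) ↔
        (l.getD i 'x' = l.getD k 'x') := by
      rw [PySem.List.pyGet?_natCast, PySem.List.pyGet?_natCast,
        List.getElem?_eq_getElem hi, List.getElem?_eq_getElem hkl,
        List.getD_eq_getElem l 'x' hi, List.getD_eq_getElem l 'x' hkl]
      exact ⟨fun h => Option.some.injEq _ _ ▸ h, fun h => by rw [h]⟩
    rw [kmpLoop]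
    split_ifs with h1 h2
    · -- match: answer is k+1
      have hc : l.getD i 'x' = l.getD k 'x' := hcond.mp h1
      have hFk : F l (i+1) = k + 1 := by
        apply le_antisymm
        · rcases hF : F l (i+1) with _ | c
          · omega
          · have hisb := F_isB l (i := i+1) (by omega)
            rw [hF] at hisb
            have := hmax c hisb
            omega
        · exact F_max (isB_ext.mpr ⟨hk, hc.symm⟩)
      rw [hFk]; push_cast; ring
    · -- mismatch at k = 0: answer is 0
      have hk0 : k = 0 := by exact_mod_cast h2
      have hF0 : F l (i+1) = 0 := by
        rcases hF : F l (i+1) with _ | c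
        · rfl
        · exfalso
          have hisb := F_isB l (i := i+1) (by omega)
          rw [hF] at hisb
          have hc0 : c = 0 := by have := hmax c hisb; omega
          rw [hc0] at hisb
          have := (isB_ext.mp hisb).2
          exact h1 (hcond.mpr (hk0 ▸ this.symm))
      rw [hF0]; rfl
    · -- mismatch, k > 0: follow the border chain
      have hk1 : 1 ≤ k := by
        rcases Nat.eq_zero_or_pos k with h | h
        · exfalso; exact h2 (by exact_mod_cast congrArg (Nat.cast : Nat → Int) h)
        · exact h
      have hcast : (k : Int) - 1 = ((k - 1 : Nat) : Int) := by omega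
      rw [hcast, hnxt (k-1) (by omega), Nat.sub_add_cancel hk1]
      have hFlt : F l k < k := F_lt l hk1
      apply IH (F l k) (isB_trans hk (F_isB l hk1))
      · intro c hc
        obtain ⟨hci, he⟩ := isB_ext.mp hc
        have hck : c ≤ k := hmax c hc
        have hne : c ≠ k := by
          intro e
          exact h1 (hcond.mpr (e ▸ he).symm)
        exact F_max (isB_down hk hci (by omega))
      · omega

lemma fold_inv (l : List Char) (hn : 1 ≤ l.length) :
    ∀ i : Nat, 1 ≤ i → i ≤ l.length →
    (((PySem.List.pyRange 1 (i:Int) 1).foldl (kmpStep l)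
        (List.replicate l.length (0:Int))).length = l.length ∧
      ∀ j : Nat, j < i →
        PySem.List.pyGetD ((PySem.List.pyRange 1 (i:Int) 1).foldl (kmpStep l)
          (List.replicate l.length (0:Int))) (j:Int) 0 = (F l (j+1) : Int)) := by
  intro i
  induction i with
  | zero => omega
  | succ m IH =>
    intro _ h2
    rcases Nat.eq_zero_or_pos m with hm | hm
    · subst hm
      rw [show ((1:Nat):Int) = 1 by norm_num, PySem.List.pyRange_one_eq_nil le_rfl]
      refine ⟨by simp, fun j hj => ?_⟩
      have hj0 : j = 0 := by omega
      subst hj0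
      rw [PySem.List.pyGetD_natCast]
      have h0 : (0:Nat) < l.length := hn
      simp [List.getD_eq_getElem?_getD, F, Nat.findGreatest_zero, h0]
    · have hmlen : m < l.length := by omega
      obtain ⟨hlen, hvals⟩ := IH hm (by omega)
      have hsplit : PySem.List.pyRange 1 ((m+1 : Nat):Int) 1 =
          PySem.List.pyRange 1 (m:Int) 1 ++ [(m:Int)] := by
        push_cast
        exact PySem.List.pyRange_one_succ_right (by exact_mod_cast hm)
      rw [hsplit, List.foldl_append]
      set nxt := (PySem.List.pyRange 1 (m:Int) 1).foldl (kmpStep l)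
        (List.replicate l.length (0:Int)) with hnxt
      simp only [List.foldl_cons, List.foldl_nil]
      rw [kmpStep]
      have hkcast : (m : Int) - 1 = ((m - 1 : Nat) : Int) := by omega
      have hk0 : PySem.List.pyGetD nxt ((m:Int) - 1) 0 = (F l m : Int) := by
        rw [hkcast, hvals (m-1) (by omega), Nat.sub_add_cancel hm]
      rw [hk0]
      have hloop : kmpLoop l nxt (m:Int) ((F l m : Nat):Int) l.length = (F l (m+1) : Int) := by
        apply kmpLoop_eq l nxt m hmlen hvals l.length (F l m) (F_isB l hm)
        · intro c hc
          exact F_max (isB_ext.mp hc).1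
        · have := F_lt l hm; omega
      rw [hloop, PySem.List.pySetD_natCast]
      constructor
      · rw [List.length_set]; exact hlen
      · intro j hj
        rw [PySem.List.pyGetD_natCast]
        have hjlen : j < (nxt.set m ((F l (m+1) : Nat):Int)).length := by
          rw [List.length_set, hlen]; omega
        rw [List.getD_eq_getElem _ _ hjlen, List.getElem_set]
        split_ifs with hjm
        · rw [← hjm]
        · have hjm' : j < m := by omega
          have := hvals j hjm'
          rw [PySem.List.pyGetD_natCast] at this
          rw [← this, List.getD_eq_getElem _ _ (by rw [hlen]; omega)]

lemma any_iff (l : List Char) {p : Nat} (hp1 : 1 ≤ p) (hpn : p < l.length) :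
    ((PySem.List.pyRange (p:Int) (l.length:Int) 1).any
      (fun i => !(PySem.List.pyGet? l i == PySem.List.pyGet? l (i - (p:Int))))) = true
    ↔ ¬ IsB l l.length (l.length - p) := by
  rw [List.any_eq_true]
  constructor
  · rintro ⟨i, hmem, hne⟩
    rw [PySem.List.mem_pyRange_one] at hmem
    obtain ⟨hip, hin⟩ := hmem
    simp only [Bool.not_eq_eq_eq_not, Bool.not_true, beq_eq_false_iff_ne, ne_eq] at hne
    rintro ⟨-, hall⟩
    have hi0 : (0:Int) ≤ i := le_trans (by exact_mod_cast Nat.zero_le p) hip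
    have hiti : ((i.toNat : Nat) : Int) = i := Int.toNat_of_nonneg hi0
    have hitp : p ≤ i.toNat := by omega
    have hitn : i.toNat < l.length := by omega
    have hj := hall (i.toNat - p) (by omega)
    have harith : l.length - (l.length - p) + (i.toNat - p) = i.toNat := by omega
    rw [harith, List.getD_eq_getElem l 'x' (by omega : i.toNat - p < l.length),
      List.getD_eq_getElem l 'x' hitn] at hj
    apply hne
    have hip' : (i - (p:Int)).toNat = i.toNat - p := by omega
    rw [PySem.List.pyGet?_of_nonneg l hi0, PySem.List.pyGet?_of_nonneg l (i := i - (p:Int)) (by omega), hip',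
      List.getElem?_eq_getElem hitn, List.getElem?_eq_getElem (by omega : i.toNat - p < l.length)]
    exact congrArg some hj.symm
  · intro hnotb
    have h1 : ¬ (∀ j < l.length - p,
        l.getD j 'x' = l.getD (l.length - (l.length - p) + j) 'x') :=
      fun hall => hnotb ⟨by omega, hall⟩
    push Not at h1
    obtain ⟨j, hj, hne⟩ := h1
    have harith : l.length - (l.length - p) + j = p + j := by omega
    rw [harith, List.getD_eq_getElem l 'x' (by omega : j < l.length),
      List.getD_eq_getElem l 'x' (by omega : p + j < l.length)] at hne
    refine ⟨((p + j : Nat) : Int), ?_, ?_⟩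
    · rw [PySem.List.mem_pyRange_one]
      constructor
      · exact_mod_cast Nat.le_add_right p j
      · exact_mod_cast (by omega : p + j < l.length)
    · simp only [Bool.not_eq_eq_eq_not, Bool.not_true, beq_eq_false_iff_ne, ne_eq]
      have h2 : (((p + j : Nat) : Int) - (p:Int)).toNat = j := by omega
      have h3 : (((p + j : Nat) : Int)).toNat = p + j := by omega
      rw [PySem.List.pyGet?_of_nonneg l (i := ((p + j : Nat) : Int)) (by positivity),
        PySem.List.pyGet?_of_nonneg l (i := ((p + j : Nat) : Int) - (p:Int)) (by omega), h2, h3,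
        List.getElem?_eq_getElem (by omega : p + j < l.length),
        List.getElem?_eq_getElem (by omega : j < l.length)]
      intro h
      exact hne (Option.some.inj h).symm

lemma pLoop_eq (l : List Char) (hn : 1 ≤ l.length) :
    ∀ k p : Nat, l.length - p ≤ k → 1 ≤ p → p ≤ l.length - F l l.length →
    pLoop l p = ((l.length - F l l.length : Nat) : Int) := by
  intro k
  induction k with
  | zero =>
    intro p hk hp1 hp2
    have hF := F_lt l hn
    have hF0 : F l l.length = 0 := by omega
    have hpn : p = l.length := by omega
    rw [pLoop, dif_neg (by omega), hpn, hF0]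
    norm_num
  | succ k IH =>
    intro p hk hp1 hp2
    have hF := F_lt l hn
    rw [pLoop]
    by_cases hpn : p < l.length
    · rw [dif_pos hpn]
      by_cases hb : IsB l l.length (l.length - p)
      · have h1 : l.length - p ≤ F l l.length := F_max hb
        have hpf : p = l.length - F l l.length := by omega
        rw [if_neg (fun hc => (any_iff l hp1 hpn).mp hc hb), hpf]
      · rw [if_pos ((any_iff l hp1 hpn).mpr hb)]
        have hne : p ≠ l.length - F l l.length := by
          intro e
          apply hb
          have h2 : l.length - p = F l l.length := by omega
          rw [h2]
          exact F_isB l hn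
        exact IH (p+1) (by omega) (by omega) (by omega)
    · rw [dif_neg hpn]
      have hF0 : F l l.length = 0 := by omega
      have hpe : p = l.length := by omega
      rw [hpe, hF0]
      norm_num

-- ===== VERDICT (by name: the statement is the Claim_ definition above) =====
theorem solution_spec : Claim_equal_solution := by
  unfold Claim_equal_solution Spec_solution
  intro s _
  simp only [solution, solution_alt]
  by_cases hl : s.toList.isEmpty
  · rw [if_pos hl, if_pos (by simpa [List.isEmpty_iff_length_eq_zero] using hl)]
  · rw [if_neg hl, if_neg (by simpa [List.isEmpty_iff_length_eq_zero] using hl)]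
    set l := s.toList with hls
    have hn : 1 ≤ l.length := by
      rcases Nat.eq_zero_or_pos l.length with h | h
      · exact absurd (by simpa [List.isEmpty_iff_length_eq_zero] using h) hl
      · exact h
    obtain ⟨hlen, hvals⟩ := fold_inv l hn l.length hn le_rfl
    set nxt := (PySem.List.pyRange 1 (l.length:Int) 1).foldl (kmpStep l)
      (List.replicate l.length (0:Int)) with hnxt
    have hne : nxt ≠ [] := by
      intro h; rw [h] at hlen; simp at hlen; omega
    have hlast : PySem.List.pyGetD nxt (-1) 0 = (F l l.length : Int) := by
      rw [show (-1:Int) = -((1:Nat):Int) by norm_num,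
        PySem.List.pyGetD_neg_natCast nxt 1 0 (by omega) (by omega),
        ← List.getD_eq_getElem nxt 0 (by omega), hlen]
      have h1 := hvals (l.length - 1) (by omega)
      rw [PySem.List.pyGetD_natCast, Nat.sub_add_cancel hn] at h1
      exact h1
    have hF := F_lt l hn
    have hp := pLoop_eq l hn l.length 1 (by omega) le_rfl (by omega)
    rw [hlast, hp]
    have hc : ((l.length:Int) - ((F l l.length : Nat):Int)) =
        ((l.length - F l l.length : Nat):Int) := by omega
    rw [hc]
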